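-- pv_equiv track=rewrite | github.com/sthfaceless/explore | scripts/dd/tune.py | calc_iters
-- ===== SOURCE A (Python) =====
-- def calc_iters(configs, min_cycles, max_cycles=5, min_models=1):
--     # assume that we start with cycle of len 1 and multiply it by 2 each time
--     # initial run
--     total_iters, curr_iter = ((1 << min_cycles) - 1) * configs, 0
--     configs = max(configs // 2, min_models)
--     # successive halving
--     while configs > min_models:
--         total_iters += (1 << (min_cycles + curr_iter)) * configs
--         configs, curr_iter = max(configs // 2, min_models), curr_iter + 1
--     # train remained models until max cycles reached
--     while min_cycles + curr_iter < max_cycles: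
--         total_iters += (1 << (min_cycles + curr_iter)) * min_models
--         curr_iter += 1
--     return total_iters
-- ===== SOURCE B (Python) =====
-- def calc_iters(configs, min_cycles, max_cycles=5, min_models=1):
--     # warmup phase as an algebraic term, successive halving as the one
--     # data-dependent loop, and the remaining constant-width phase as a
--     # closed-form geometric sum instead of A's second loop
--     total = configs * (1 << min_cycles) - configs
--     cycle = min_cycles
--     models = max(configs // 2, min_models)
--     while models > min_models:
--         total += (1 << cycle) * models
--         models = max(models // 2, min_models)
--         cycle += 1
--     if cycle < max_cycles:
--         total += min_models * ((1 << max_cycles) - (1 << cycle))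
--     return total
-- ===== Notes on version B (the rewrite author's own statement) =====
-- stated objective: faster
-- what changed: Keeps only the data-dependent successive-halving loop and replaces A's second while loop (constant min_models per cycle until max_cycles) by a closed-form geometric sum, with the warmup term written algebraically.
import Mathlib
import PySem

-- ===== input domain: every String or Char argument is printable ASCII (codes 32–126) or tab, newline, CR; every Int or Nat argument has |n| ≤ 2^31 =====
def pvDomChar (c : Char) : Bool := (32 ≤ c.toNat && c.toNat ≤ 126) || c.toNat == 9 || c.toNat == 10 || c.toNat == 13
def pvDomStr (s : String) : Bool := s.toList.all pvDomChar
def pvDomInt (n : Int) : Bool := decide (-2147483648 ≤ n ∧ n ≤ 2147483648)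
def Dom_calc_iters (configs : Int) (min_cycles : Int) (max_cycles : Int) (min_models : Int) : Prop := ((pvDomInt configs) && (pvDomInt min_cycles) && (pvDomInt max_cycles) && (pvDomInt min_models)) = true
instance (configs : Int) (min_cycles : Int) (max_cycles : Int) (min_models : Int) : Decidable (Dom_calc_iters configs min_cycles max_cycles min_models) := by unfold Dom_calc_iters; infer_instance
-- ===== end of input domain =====

-- B keeps A's data-dependent halving loop but replaces A's second while loop by a
-- closed-form geometric sum (objective: faster on large max_cycles - min_cycles).


-- ===== PORT A =====
-- A's successive-halving while loop; the fuel only makes it total (it is not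
-- consumed when the guard is false, and under Pre_ it is never exhausted).
def pvAHalve (fuel : Nat) (total curr configs min_cycles min_models : Int) : Int × Int :=
  match fuel with
  | 0 => (total, curr)
  | f + 1 =>
    if min_models < configs then
      pvAHalve f (total + 2 ^ (min_cycles + curr).toNat * configs) (curr + 1)
        (max (PySem.Int.floordiv configs 2) min_models) min_cycles min_models
    else (total, curr)

-- A's second while loop ("train remained models until max cycles reached")
def pvATail (min_cycles max_cycles min_models total curr : Int) : Int :=
  if min_cycles + curr < max_cycles then
    pvATail min_cycles max_cycles min_models
      (total + 2 ^ (min_cycles + curr).toNat * min_models) (curr + 1)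
  else total
termination_by (max_cycles - min_cycles - curr).toNat
decreasing_by omega

def calc_iters (configs : Int) (min_cycles : Int) (max_cycles : Int) (min_models : Int) : Int :=
  -- total_iters = ((1 << min_cycles) - 1) * configs; configs = max(configs // 2, min_models)
  pvATail min_cycles max_cycles min_models
    (pvAHalve ((max (PySem.Int.floordiv configs 2) min_models).toNat + 1)
      ((2 ^ min_cycles.toNat - 1) * configs) 0
      (max (PySem.Int.floordiv configs 2) min_models) min_cycles min_models).1
    (pvAHalve ((max (PySem.Int.floordiv configs 2) min_models).toNat + 1)
      ((2 ^ min_cycles.toNat - 1) * configs) 0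
      (max (PySem.Int.floordiv configs 2) min_models) min_cycles min_models).2

-- ===== PORT B =====
-- B's halving loop, ending with B's closed-form tail term; the fuel only makes
-- it total (never exhausted under Pre_).
def pvBHalve (fuel : Nat) (total cycle models max_cycles min_models : Int) : Int :=
  match fuel with
  | 0 => total
  | f + 1 =>
    if min_models < models then
      pvBHalve f (total + 2 ^ cycle.toNat * models) (cycle + 1)
        (max (PySem.Int.floordiv models 2) min_models) max_cycles min_models
    else
      if cycle < max_cycles then
        total + min_models * (2 ^ max_cycles.toNat - 2 ^ cycle.toNat)
      else total

def calc_iters_alt (configs : Int) (min_cycles : Int) (max_cycles : Int) (min_models : Int) : Int :=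
  -- total = configs * (1 << min_cycles) - configs; models = max(configs // 2, min_models)
  pvBHalve ((max (PySem.Int.floordiv configs 2) min_models).toNat + 1)
    (configs * 2 ^ min_cycles.toNat - configs) min_cycles
    (max (PySem.Int.floordiv configs 2) min_models) max_cycles min_models

-- ===== PRECONDITION & SPEC =====
-- Pre_ excludes exactly the inputs where A does not return normally: min_cycles < 0
-- (A raises ValueError on the shift) and min_models < 0 with configs // 2 > min_models
-- (A's halving loop gets stuck above a negative min_models and diverges).
def Pre_calc_iters (configs : Int) (min_cycles : Int) (max_cycles : Int) (min_models : Int) : Prop :=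
  0 ≤ min_cycles ∧ (0 ≤ min_models ∨ configs ≤ 2 * min_models + 1)
instance (configs : Int) (min_cycles : Int) (max_cycles : Int) (min_models : Int) : Decidable (Pre_calc_iters configs min_cycles max_cycles min_models) := by unfold Pre_calc_iters; infer_instance

def pvWitness_calc_iters : Int × Int × Int × Int := (16, 1, 5, 1)

def Spec_calc_iters (configs : Int) (min_cycles : Int) (max_cycles : Int) (min_models : Int) (out : Int) : Prop := out = calc_iters_alt configs min_cycles max_cycles min_models
instance (configs : Int) (min_cycles : Int) (max_cycles : Int) (min_models : Int) (out : Int) : Decidable (Spec_calc_iters configs min_cycles max_cycles min_models out) := by unfold Spec_calc_iters; infer_instance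

-- ===== CLAIM (what is proved, stated in full; the proofs are below) =====
def Claim_equal_calc_iters : Prop := ∀ (configs : Int) (min_cycles : Int) (max_cycles : Int) (min_models : Int), Dom_calc_iters configs min_cycles max_cycles min_models → Pre_calc_iters configs min_cycles max_cycles min_models → Spec_calc_iters configs min_cycles max_cycles min_models (calc_iters configs min_cycles max_cycles min_models)

-- ===== LEMMAS AND PROOFS =====

-- floor division by 2, via floordiv = ediv for a positive divisor
theorem pvFdiv2_lt_self {m : Int} (h : 1 ≤ m) : PySem.Int.floordiv m 2 < m := by
  rw [PySem.Int.floordiv_eq_ediv_of_pos (by omega)]; omega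

-- A's tail loop equals B's closed-form geometric sum
theorem pvTailCF (min_cycles max_cycles min_models : Int) :
    ∀ (n : Nat) (total curr : Int), 0 ≤ min_cycles + curr →
      n = (max_cycles - min_cycles - curr).toNat →
      pvATail min_cycles max_cycles min_models total curr
        = if min_cycles + curr < max_cycles then
            total + min_models * (2 ^ max_cycles.toNat - 2 ^ (min_cycles + curr).toNat)
          else total := by
  intro n
  induction n with
  | zero =>
    intro total curr hc hn
    have hlt : ¬ min_cycles + curr < max_cycles := by omega
    rw [pvATail]
    simp [hlt]
  | succ k ih =>
    intro total curr hc hn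
    have hlt : min_cycles + curr < max_cycles := by omega
    rw [pvATail, if_pos hlt, if_pos hlt,
      ih _ (curr + 1) (by omega) (by omega)]
    have hsucc : (min_cycles + (curr + 1)).toNat = (min_cycles + curr).toNat + 1 := by omega
    by_cases h2 : min_cycles + (curr + 1) < max_cycles
    · rw [if_pos h2, hsucc, pow_succ]
      ring
    · rw [if_neg h2]
      have hM : max_cycles.toNat = (min_cycles + curr).toNat + 1 := by omega
      rw [hM, pow_succ]
      ring

-- B's loop simulates A's halving loop followed by A's tail loop
theorem pvBsim (min_cycles max_cycles min_models : Int)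
    (hmc : 0 ≤ min_cycles) (hmm : 0 ≤ min_models) :
    ∀ (f : Nat) (total curr models : Int), 0 ≤ curr → min_models ≤ models →
      models.toNat < f →
      pvBHalve f total (min_cycles + curr) models max_cycles min_models
        = pvATail min_cycles max_cycles min_models
            (pvAHalve f total curr models min_cycles min_models).1
            (pvAHalve f total curr models min_cycles min_models).2 := by
  intro f
  induction f with
  | zero => intro _ _ _ _ _ h; omega
  | succ f ih =>
    intro total curr models hc hge hf
    by_cases hg : min_models < models
    · simp only [pvBHalve, pvAHalve, hg, if_pos]
      have hlt : max (PySem.Int.floordiv models 2) min_models < models := by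
        have := pvFdiv2_lt_self (by omega : (1:Int) ≤ models); omega
      have hassoc : min_cycles + curr + 1 = min_cycles + (curr + 1) := by ring
      rw [hassoc, ih _ (curr + 1) _ (by omega) (le_max_right _ _) (by omega)]
    · simp only [pvBHalve, pvAHalve, hg, if_false]
      rw [pvTailCF min_cycles max_cycles min_models
        (max_cycles - min_cycles - curr).toNat total curr (by omega) rfl]

-- ===== VERDICT (by name: the statement is the Claim_ definition above) =====
theorem calc_iters_spec : Claim_equal_calc_iters := by
  intro configs min_cycles max_cycles min_models _ hpre
  obtain ⟨hmc, hcase⟩ := hpre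
  unfold Spec_calc_iters calc_iters calc_iters_alt
  rw [show configs * 2 ^ min_cycles.toNat - configs
      = (2 ^ min_cycles.toNat - 1) * configs from by ring]
  by_cases hmm : 0 ≤ min_models
  · have := pvBsim min_cycles max_cycles min_models hmc hmm
      ((max (PySem.Int.floordiv configs 2) min_models).toNat + 1)
      ((2 ^ min_cycles.toNat - 1) * configs) 0
      (max (PySem.Int.floordiv configs 2) min_models) le_rfl (le_max_right _ _) (by omega)
    rw [add_zero] at this
    rw [this]
  · -- the accidental corner min_models < 0, configs ≤ 2*min_models + 1:
    -- the halving loop is skipped in both programs and only the tail remains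
    have hc2 : configs ≤ 2 * min_models + 1 := by
      rcases hcase with h | h
      · omega
      · exact h
    have hd : PySem.Int.floordiv configs 2 ≤ min_models := by
      rw [PySem.Int.floordiv_eq_ediv_of_pos (by omega : (0:Int) < 2)]; omega
    rw [max_eq_right hd]
    rw [show min_models.toNat + 1 = 0 + 1 from by omega]
    simp only [pvAHalve, pvBHalve, lt_irrefl, if_false]
    rw [pvTailCF min_cycles max_cycles min_models
      (max_cycles - min_cycles - 0).toNat ((2 ^ min_cycles.toNat - 1) * configs) 0
      (by omega) rfl]
    norm_num
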